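-- pv_equiv track=rewrite | github.com/comherron/CourseraDiscreteMath | Diagonals/backTrackingDiagonals.py | getSlashes
-- ===== SOURCE A (Python) =====
-- def getSlashes(grid):
--     ''' Input:
--     grid: a int[][] that represents the grid we are working on
--     Output:
--     an integer representing the number of slashes present in the grid
--     Extra:
--     terminates the moment it hits a -1 to save on run time (hopefully)'''
--     total =0
--     for i in grid:
--         for j in i:
--             if j == 2 or j == 1:
--                 total =total +1
--             if j == -1:
--                 return total
--     return total
-- ===== SOURCE B (Python) =====
-- def getSlashes(grid):
--     total = 0
--     for row in grid:
--         if -1 in row: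
--             pre = row[:row.index(-1)]
--             return total + pre.count(1) + pre.count(2)
--         total += row.count(1) + row.count(2)
--     return total
-- ===== Notes on version B (the rewrite author's own statement) =====
-- stated objective: alternative
-- what changed: Works row-wise with list primitives instead of element-wise conditionals: for each row it tests -1 membership, slices the row at row.index(-1) when present, and totals via two .count() passes per row, rather than scanning cell by cell with inline ifs and an early return.
import Mathlib
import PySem

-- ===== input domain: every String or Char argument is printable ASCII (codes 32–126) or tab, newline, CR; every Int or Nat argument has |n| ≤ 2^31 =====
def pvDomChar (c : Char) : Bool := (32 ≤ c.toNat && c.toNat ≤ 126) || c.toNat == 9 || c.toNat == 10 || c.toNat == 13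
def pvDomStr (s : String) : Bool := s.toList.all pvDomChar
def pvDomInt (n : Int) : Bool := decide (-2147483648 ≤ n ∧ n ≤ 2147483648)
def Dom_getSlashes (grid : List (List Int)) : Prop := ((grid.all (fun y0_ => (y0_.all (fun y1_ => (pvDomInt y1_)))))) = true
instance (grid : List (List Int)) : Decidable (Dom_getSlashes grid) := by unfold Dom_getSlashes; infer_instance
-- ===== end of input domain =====

-- B replaces A's cell-by-cell scan (inline ifs, early return) with row-wise list primitives
-- (membership test, index/slice at the first -1, two counts per row), proved equal to A.

-- ===== PORT A =====
-- inner 'for j in i' loop: returns (total, true) if the 'return total' fired, else (total, false)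
def getSlashesRow : List Int → Int → Int × Bool
  | [], total => (total, false)
  | j :: js, total =>
    let total := if j == 2 || j == 1 then total + 1 else total
    if j == -1 then (total, true) else getSlashesRow js total

-- outer 'for i in grid' loop
def getSlashesLoop : List (List Int) → Int → Int
  | [], total => total
  | i :: is, total =>
    match getSlashesRow i total with
    | (total, true) => total
    | (total, false) => getSlashesLoop is total

def getSlashes (grid : List (List Int)) : Int := getSlashesLoop grid 0

-- ===== PORT B =====
-- 'if -1 in row: pre = row[:row.index(-1)]; return total + pre.count(1) + pre.count(2)'
-- row.index(-1) = PySem.List.index?; .getD 0 is never the default in the branch since -1 ∈ row.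
def getSlashesAltLoop : List (List Int) → Int → Int
  | [], total => total
  | row :: rows, total =>
    if (-1 : Int) ∈ row then
      let pre := PySem.List.slice row none (some ((PySem.List.index? row (-1)).getD 0 : Nat))
      total + (PySem.List.count pre 1 : Int) + (PySem.List.count pre 2 : Int)
    else
      getSlashesAltLoop rows (total + (PySem.List.count row 1 : Int) + (PySem.List.count row 2 : Int))

def getSlashes_alt (grid : List (List Int)) : Int := getSlashesAltLoop grid 0

-- ===== PRECONDITION & SPEC =====
def Spec_getSlashes (grid : List (List Int)) (out : Int) : Prop := out = getSlashes_alt grid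
instance (grid : List (List Int)) (out : Int) : Decidable (Spec_getSlashes grid out) := by unfold Spec_getSlashes; infer_instance

-- ===== CLAIM (what is proved, stated in full; the proofs are below) =====
def Claim_equal_getSlashes : Prop := ∀ (grid : List (List Int)), Dom_getSlashes grid → Spec_getSlashes grid (getSlashes grid)

-- ===== LEMMAS AND PROOFS =====

def pvCnt (l : List Int) : Int := ((l.count 1 : Int) + (l.count 2 : Int))

lemma pvCnt_cons (x : Int) (l : List Int) :
    pvCnt (x :: l) = (if x == 2 || x == 1 then 1 else 0) + pvCnt l := by
  simp only [pvCnt, List.count_cons]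
  by_cases h1 : x = 1 <;> by_cases h2 : x = 2 <;> simp [h1, h2]; all_goals omega

lemma pvRow_eq (l : List Int) (t : Int) :
    getSlashesRow l t = (t + pvCnt (l.takeWhile (fun v => v != -1)), l.any (fun v => v == -1)) := by
  induction l generalizing t with
  | nil => simp [getSlashesRow, pvCnt]
  | cons j js ih =>
    simp only [getSlashesRow]
    by_cases hj : j = -1
    · subst hj
      norm_num [pvCnt, List.takeWhile_cons]
    · have hj' : (j == -1) = false := by simp [hj]
      have hb : (j != -1) = true := by simp [bne, hj]
      simp only [hj', Bool.false_eq_true, if_false, ih, List.takeWhile_cons, hb, if_pos,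
        pvCnt_cons, List.any_cons]
      simp only [Prod.mk.injEq, Bool.false_or]
      exact ⟨by split_ifs <;> ring, trivial⟩

lemma pvTW_app_none (l1 l2 : List Int) (h : ∀ x ∈ l1, x ≠ -1) :
    (l1 ++ l2).takeWhile (fun v => v != -1) = l1 ++ l2.takeWhile (fun v => v != -1) := by
  induction l1 with
  | nil => simp
  | cons x xs ih =>
    have hx : (x != -1) = true := by simp [bne]; exact h x (by simp)
    simp only [List.cons_append, List.takeWhile_cons, hx, if_pos]
    rw [ih (fun y hy => h y (by simp [hy]))]

lemma pvTW_self (l : List Int) (h : ∀ x ∈ l, x ≠ -1) :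
    l.takeWhile (fun v => v != -1) = l := by
  have := pvTW_app_none l [] h
  simpa using this

-- when -1 ∈ row, the takeWhile prefix is exactly row[:row.index(-1)]
lemma pvTW_eq_take_index (row : List Int) (k : Nat)
    (hk : PySem.List.index? row (-1) = some k) :
    row.takeWhile (fun v => v != -1) = row.take k := by
  obtain ⟨pre, suf, hrow, hlen, hnm⟩ := ((PySem.List.index?_eq_some_iff row (-1) k).mp hk)
  subst hrow
  rw [pvTW_app_none pre ((-1) :: suf) (fun x hx he => hnm (he ▸ hx))]
  have : ((-1 : Int) :: suf).takeWhile (fun v => v != -1) = [] := by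
    simp
  rw [this, List.append_nil, ← hlen, List.take_left]

lemma pvLoop_eq (grid : List (List Int)) (t : Int) :
    getSlashesLoop grid t = getSlashesAltLoop grid t := by
  induction grid generalizing t with
  | nil => rfl
  | cons row rows ih =>
    simp only [getSlashesLoop, pvRow_eq, getSlashesAltLoop]
    by_cases hm : (-1 : Int) ∈ row
    · have hany : row.any (fun v => v == -1) = true := by
        simp only [List.any_eq_true, beq_iff_eq]; exact ⟨-1, hm, rfl⟩
      obtain ⟨k, hk⟩ := Option.isSome_iff_exists.mp
        ((PySem.List.index?_isSome_iff (xs := row) (v := -1)).mpr hm)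
      rw [hany, if_pos hm, hk]
      simp only [Option.getD_some]
      rw [PySem.List.slice_to_natCast, pvTW_eq_take_index row k hk]
      simp only [pvCnt, PySem.List.count_eq]
      ring
    · have hall : ∀ x ∈ row, x ≠ -1 := fun x hx he => hm (he ▸ hx)
      have hany : row.any (fun v => v == -1) = false := by
        simp only [List.any_eq_false, beq_iff_eq]; exact hall
      rw [hany, if_neg hm]
      show getSlashesLoop rows (t + pvCnt (row.takeWhile (fun v => v != -1))) = _
      rw [ih, pvTW_self row hall]
      simp only [pvCnt, PySem.List.count_eq, add_assoc]

-- ===== VERDICT (by name: the statement is the Claim_ definition above) =====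
theorem getSlashes_spec : Claim_equal_getSlashes := by
  intro grid _
  show getSlashes grid = getSlashes_alt grid
  exact pvLoop_eq grid 0
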